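-- pv_equiv track=rewrite | github.com/LeoPkm2-1/steganography-demo | sound/test4.py | getnumfirstframe0
-- ===== SOURCE A (Python) =====
-- def getnumfirstframe0(frame_bytes):
--     res=0
--     for i in range(0,len(frame_bytes)):
--         if frame_bytes[i]==0:
--             res+=1
--         else:
--             break
--     return res
-- ===== SOURCE B (Python) =====
-- def getnumfirstframe0(frame_bytes):
--     # Staged computation: first collect the positions of ALL nonzero bytes in one
--     # full comprehension pass (no break), then the count of leading zeros is the
--     # first such position, or the whole length when every byte is zero.
--     nonzero_positions = [i for i, b in enumerate(frame_bytes) if b != 0]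
--     if nonzero_positions:
--         return nonzero_positions[0]
--     return len(frame_bytes)
-- ===== Notes on version B (the rewrite author's own statement) =====
-- stated objective: alternative
-- what changed: B replaces A's early-exit counting loop by two stages: a full comprehension pass that materialises the list of all nonzero positions, then returns its first element (or the length when the list is empty); there is no counter and no break.
import Mathlib
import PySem

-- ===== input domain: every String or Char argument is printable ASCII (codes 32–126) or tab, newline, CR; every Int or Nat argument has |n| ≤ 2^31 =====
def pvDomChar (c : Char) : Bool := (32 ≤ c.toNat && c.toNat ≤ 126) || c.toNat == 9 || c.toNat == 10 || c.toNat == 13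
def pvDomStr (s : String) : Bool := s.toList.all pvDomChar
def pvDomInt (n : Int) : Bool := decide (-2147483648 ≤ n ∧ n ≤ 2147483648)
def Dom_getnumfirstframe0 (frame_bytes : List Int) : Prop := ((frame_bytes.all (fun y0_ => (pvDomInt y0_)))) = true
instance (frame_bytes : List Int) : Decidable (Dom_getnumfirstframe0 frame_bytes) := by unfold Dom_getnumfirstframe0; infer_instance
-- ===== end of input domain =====

-- B replaces A's early-exit counting loop by two stages: materialise all nonzero positions, then take the first (alternative decomposition, same cost).

-- ===== PORT A =====
-- A's for-loop over range(0, len) with break, carrying the counter res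
def getnumfirstframe0_loop (frame_bytes : List Int) (i : Nat) (res : Int) : Int :=
  if h : i < frame_bytes.length then
    if frame_bytes[i] == 0 then getnumfirstframe0_loop frame_bytes (i + 1) (res + 1)
    else res
  else res
termination_by frame_bytes.length - i

def getnumfirstframe0 (frame_bytes : List Int) : Int :=
  getnumfirstframe0_loop frame_bytes 0 0

-- ===== PORT B =====
-- Source B: nonzero_positions = [i for i, b in enumerate(frame_bytes) if b != 0];
--       return nonzero_positions[0] if nonempty else len(frame_bytes)
def getnumfirstframe0_alt (frame_bytes : List Int) : Int :=
  let nonzero_positions :=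
    ((PySem.List.enumerate frame_bytes).filter (fun p => p.2 != 0)).map (fun p => p.1)
  match nonzero_positions with
  | [] => (frame_bytes.length : Int)
  | i :: _ => i

-- ===== PRECONDITION & SPEC =====
def Spec_getnumfirstframe0 (frame_bytes : List Int) (out : Int) : Prop := out = getnumfirstframe0_alt frame_bytes
instance (frame_bytes : List Int) (out : Int) : Decidable (Spec_getnumfirstframe0 frame_bytes out) := by unfold Spec_getnumfirstframe0; infer_instance

-- ===== CLAIM (what is proved, stated in full; the proofs are below) =====
def Claim_equal_getnumfirstframe0 : Prop := ∀ (frame_bytes : List Int), Dom_getnumfirstframe0 frame_bytes → Spec_getnumfirstframe0 frame_bytes (getnumfirstframe0 frame_bytes)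

-- ===== LEMMAS AND PROOFS =====
-- A's loop counts up to the first nonzero element: it equals res + findIdx (· ≠ 0) of the remaining suffix.
theorem getnumfirstframe0_loop_eq (frame_bytes : List Int) (i : Nat) (res : Int) :
    getnumfirstframe0_loop frame_bytes i res
      = res + ((frame_bytes.drop i).findIdx (fun b => b != 0) : Int) := by
  fun_induction getnumfirstframe0_loop frame_bytes i res with
  | case1 i res h hz ih =>
      rw [ih, List.drop_eq_getElem_cons h, List.findIdx_cons]
      simp at hz
      simp [hz]
      ring
  | case2 i res h hz =>
      rw [List.drop_eq_getElem_cons h, List.findIdx_cons]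
      simp at hz
      simp [cond_eq_ite, bne_iff_ne, hz]
  | case3 i res h =>
      rw [List.drop_eq_nil_of_le (by omega)]
      simp

-- B's staged computation, generalized over the enumeration start, equals start + findIdx.
theorem alt_stage_eq (frame_bytes : List Int) (s : Int) :
    (match ((PySem.List.enumerate frame_bytes s).filter (fun p => p.2 != 0)).map (fun p => p.1) with
     | [] => s + (frame_bytes.length : Int)
     | i :: _ => i)
      = s + (frame_bytes.findIdx (fun b => b != 0) : Int) := by
  induction frame_bytes generalizing s with
  | nil => simp [PySem.List.enumerate_nil]
  | cons x xs ih =>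
      rw [PySem.List.enumerate_cons, List.findIdx_cons]
      by_cases hx : x = 0
      · have := ih (s + 1)
        simp [hx] at this ⊢
        rw [show s + ((xs.length : Int) + 1) = s + 1 + (xs.length : Int) by ring,
            show s + ((List.findIdx (fun b => b != 0) xs : Int) + 1)
                = s + 1 + (List.findIdx (fun b => b != 0) xs : Int) by ring]
        exact this
      · simp [hx, cond_eq_ite, bne_iff_ne]

-- ===== VERDICT (by name: the statement is the Claim_ definition above) =====
theorem getnumfirstframe0_spec : Claim_equal_getnumfirstframe0 := by
  intro fb _
  unfold Spec_getnumfirstframe0 getnumfirstframe0 getnumfirstframe0_alt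
  have h := alt_stage_eq fb 0
  simp at h
  rw [h]
  simpa using getnumfirstframe0_loop_eq fb 0 0
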